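-- pv_equiv track=rewrite | github.com/Alexisxty/SocialOmni | models/model_server/ming/ming_lib/bailingmm_utils.py | find_first_index_of_consecutive_ones
-- ===== SOURCE A (Python) =====
-- def find_first_index_of_consecutive_ones(lst):
--     """
--     输入一个由0和1组成的列表，返回每个连续1片段的第一个1的索引。
--
--     参数:
--         lst (list): 元素为0或1的列表
--
--     返回:
--         list: 每个连续1片段的首个1的索引列表
--     """
--     result = []
--     i = 0
--     n = len(lst)
--
--     while i < n:
--         if lst[i] == 1:
--             # 找到一个连续1片段的开始
--             result.append(i)
--             # 跳过整个连续的1片段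
--             while i < n and lst[i] == 1:
--                 i += 1
--         else:
--             i += 1
--
--     return result
-- ===== SOURCE B (Python) =====
-- def find_first_index_of_consecutive_ones(lst):
--     result = []
--     prev = None
--     for i, x in enumerate(lst):
--         if x == 1 and prev != 1:
--             result.append(i)
--         prev = x
--     return result
-- ===== Notes on version B (the rewrite author's own statement) =====
-- stated objective: simpler
-- what changed: Replaced the nested while loops with manual index advancement by a single flat enumerate pass that appends i exactly on a rising edge (lst[i]==1 and previous element != 1).
import Mathlib
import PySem

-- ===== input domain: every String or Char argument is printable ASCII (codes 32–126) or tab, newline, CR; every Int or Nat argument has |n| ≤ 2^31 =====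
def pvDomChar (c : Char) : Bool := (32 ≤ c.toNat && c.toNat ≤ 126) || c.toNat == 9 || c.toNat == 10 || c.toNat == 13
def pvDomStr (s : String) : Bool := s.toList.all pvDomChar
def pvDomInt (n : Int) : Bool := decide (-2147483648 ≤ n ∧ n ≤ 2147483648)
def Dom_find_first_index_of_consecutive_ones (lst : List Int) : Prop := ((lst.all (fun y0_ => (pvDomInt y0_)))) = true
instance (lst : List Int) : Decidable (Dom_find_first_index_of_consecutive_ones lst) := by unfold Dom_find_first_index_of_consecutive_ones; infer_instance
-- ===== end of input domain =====

-- B replaces A's nested while loops (inner skip loop + manual index advancement) by one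
-- flat pass that records i exactly at the rising edge of each run of ones (objective: simpler).

-- ===== PORT A =====
-- inner 'while i < n and lst[i] == 1: i += 1' — returns the remaining suffix and the new index
def pvSkipA : List Int → Int → (List Int × Int)
  | [], i => ([], i)
  | x :: xs, i => if x = 1 then pvSkipA xs (i + 1) else (x :: xs, i)

theorem pvSkipA_len_le : ∀ (xs : List Int) (i : Int), (pvSkipA xs i).1.length ≤ xs.length := by
  intro xs
  induction xs with
  | nil => intro i; simp [pvSkipA]
  | cons x xs ih =>
    intro i
    simp only [pvSkipA]
    split
    · exact le_trans (ih (i + 1)) (Nat.le_succ _)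
    · simp

-- outer 'while i < n' loop of A, as recursion on the remaining suffix with the index carried
def pvGoA : List Int → Int → List Int
  | [], _ => []
  | x :: xs, i =>
    if x = 1 then
      i :: (let p := pvSkipA xs (i + 1); pvGoA p.1 p.2)
    else
      pvGoA xs (i + 1)
termination_by xs _ => xs.length
decreasing_by
  · exact Nat.lt_succ_of_le (pvSkipA_len_le xs (i + 1))
  · simp

def find_first_index_of_consecutive_ones (lst : List Int) : List Int := pvGoA lst 0

-- ===== PORT B =====
-- B's single for-loop over enumerate(lst), carrying prev (None before the first element)
def pvGoB : List Int → Option Int → Int → List Int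
  | [], _, _ => []
  | x :: xs, prev, i =>
    (if x = 1 ∧ prev ≠ some 1 then [i] else []) ++ pvGoB xs (some x) (i + 1)

def find_first_index_of_consecutive_ones_alt (lst : List Int) : List Int := pvGoB lst none 0

-- ===== PRECONDITION & SPEC =====
def Spec_find_first_index_of_consecutive_ones (lst : List Int) (out : List Int) : Prop := out = find_first_index_of_consecutive_ones_alt lst
instance (lst : List Int) (out : List Int) : Decidable (Spec_find_first_index_of_consecutive_ones lst out) := by unfold Spec_find_first_index_of_consecutive_ones; infer_instance

-- ===== CLAIM (what is proved, stated in full; the proofs are below) =====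
def Claim_equal_find_first_index_of_consecutive_ones : Prop := ∀ (lst : List Int), Dom_find_first_index_of_consecutive_ones lst → Spec_find_first_index_of_consecutive_ones lst (find_first_index_of_consecutive_ones lst)

-- ===== LEMMAS AND PROOFS =====

-- Mutual invariant, by strong induction on the length of the suffix:
-- (1) when the previous element is not a 1 (or there is none), A's outer loop agrees with B's pass;
-- (2) A's skip-then-resume agrees with B's pass entered with prev = 1.
theorem pv_main : ∀ (n : ℕ) (xs : List Int), xs.length ≤ n →
    ((∀ (prev : Option Int) (i : Int), prev ≠ some 1 → pvGoA xs i = pvGoB xs prev i) ∧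
     (∀ i : Int, (let p := pvSkipA xs i; pvGoA p.1 p.2) = pvGoB xs (some 1) i)) := by
  intro n
  induction n with
  | zero =>
    intro xs hlen
    have : xs = [] := List.eq_nil_of_length_eq_zero (Nat.le_zero.mp hlen)
    subst this
    exact ⟨fun _ _ _ => by simp [pvGoA, pvGoB], fun _ => by simp [pvSkipA, pvGoA, pvGoB]⟩
  | succ n ih =>
    intro xs hlen
    cases xs with
    | nil => exact ⟨fun _ _ _ => by simp [pvGoA, pvGoB], fun _ => by simp [pvSkipA, pvGoA, pvGoB]⟩
    | cons x xs =>
      have hxs : xs.length ≤ n := Nat.lt_succ_iff.mp hlen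
      constructor
      · intro prev i hprev
        by_cases hx : x = 1
        · subst hx
          simp only [pvGoA, pvGoB]
          simp only [if_true, true_and]
          rw [if_pos hprev, List.singleton_append]
          exact congrArg (i :: ·) (by simpa using (ih xs hxs).2 (i + 1))
        · simp only [pvGoA, pvGoB, if_neg hx,
            if_neg (show ¬ (x = 1 ∧ prev ≠ some 1) from fun h => hx h.1), List.nil_append]
          exact (ih xs hxs).1 (some x) (i + 1) (by simpa using hx)
      · intro i
        by_cases hx : x = 1
        · subst hx
          simp only [pvSkipA, pvGoB]
          simpa using (ih xs hxs).2 (i + 1)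
        · simp only [pvSkipA, pvGoB, if_neg hx,
            if_neg (show ¬ (x = 1 ∧ some (1:Int) ≠ some 1) from fun h => hx h.1), List.nil_append]
          simp only [pvGoA, if_neg hx]
          exact (ih xs hxs).1 (some x) (i + 1) (by simpa using hx)

-- ===== VERDICT (by name: the statement is the Claim_ definition above) =====
theorem find_first_index_of_consecutive_ones_spec : Claim_equal_find_first_index_of_consecutive_ones := by
  intro lst _
  unfold Spec_find_first_index_of_consecutive_ones find_first_index_of_consecutive_ones find_first_index_of_consecutive_ones_alt
  exact (pv_main lst.length lst le_rfl).1 none 0 (by simp)
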